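-- pv_equiv track=rewrite | github.com/Ryanhangralim/VMTBO | app.py | convert
-- ===== SOURCE A (Python) =====
-- def convert(list):
--     roti = {
--         "a" : "Roti Kecil.", #input sandwich
--         "b" : "Roti Besar."
--     }
--
--     sayur = {
--         "c" : "Tomat,",
--         "d" : "Selada,",
--         "e" : "Paprika,",
--         "f" : "Bawang,"
--     }
--
--     daging = {
--         "g" : "Daging Ayam.",
--         "h" : "Daging Sapi.",
--         "i" : "Daging Tuna."
--     }
--
--     saus = {
--         "j" : "Saus BBQ.",
--         "k" : "Saus Mayonnaise.",
--         "l" : "Saus Tomat.",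
--         "m" : "Saus Cabai.",
--     }
--
--     roti_output = "Roti : "
--     sayur_output = "Sayur : "
--     daging_output = "Daging : "
--     saus_output = "Saus : "
--     for i in list:
--         if i in roti:
--             roti_output += roti[i]
--         elif i in sayur:
--             sayur_output += sayur[i] + " "
--         elif i in daging:
--             daging_output += daging[i]
--         elif i in saus:
--             saus_output += saus[i]
--     sayur_output = sayur_output[:-2] + "."
--     return f"{roti_output}\n{sayur_output}\n{daging_output}\n{saus_output}"
-- ===== SOURCE B (Python) =====
-- def convert(list):
--     roti = {
--         "a": "Roti Kecil.",
--         "b": "Roti Besar."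
--     }
--     sayur = {
--         "c": "Tomat,",
--         "d": "Selada,",
--         "e": "Paprika,",
--         "f": "Bawang,"
--     }
--     daging = {
--         "g": "Daging Ayam.",
--         "h": "Daging Sapi.",
--         "i": "Daging Tuna."
--     }
--     saus = {
--         "j": "Saus BBQ.",
--         "k": "Saus Mayonnaise.",
--         "l": "Saus Tomat.",
--         "m": "Saus Cabai.",
--     }
--     roti_output = "Roti : " + "".join(roti[c] for c in list if c in roti)
--     sayur_mid = "Sayur : " + "".join(sayur[c] + " " for c in list if c in sayur)
--     sayur_output = sayur_mid[:-2] + "."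
--     daging_output = "Daging : " + "".join(daging[c] for c in list if c in daging)
--     saus_output = "Saus : " + "".join(saus[c] for c in list if c in saus)
--     return f"{roti_output}\n{sayur_output}\n{daging_output}\n{saus_output}"
-- ===== Notes on version B (the rewrite author's own statement) =====
-- stated objective: simpler
-- what changed: Replaced A's single loop threading four accumulator strings through an if/elif chain with four independent per-category passes, each a filter-and-join comprehension over the input (same sayur [:-2]+'.' arithmetic).
import Mathlib
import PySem

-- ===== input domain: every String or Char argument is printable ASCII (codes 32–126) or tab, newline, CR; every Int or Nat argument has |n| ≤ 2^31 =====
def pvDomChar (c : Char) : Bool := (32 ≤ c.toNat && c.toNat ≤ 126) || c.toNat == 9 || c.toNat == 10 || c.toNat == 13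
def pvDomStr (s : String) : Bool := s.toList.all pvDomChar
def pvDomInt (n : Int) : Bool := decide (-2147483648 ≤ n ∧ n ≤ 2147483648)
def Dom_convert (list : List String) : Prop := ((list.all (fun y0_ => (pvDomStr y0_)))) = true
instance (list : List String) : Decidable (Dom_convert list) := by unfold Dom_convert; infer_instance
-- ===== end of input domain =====

-- B replaces A's single four-accumulator loop with four independent filter-and-join passes,
-- one per category (objective: simpler per-category decomposition, same cost).

-- ===== PORT A =====
def rotiA : PySem.Dict String String :=
  PySem.Dict.ofList [("a", "Roti Kecil."), ("b", "Roti Besar.")]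
def sayurA : PySem.Dict String String :=
  PySem.Dict.ofList [("c", "Tomat,"), ("d", "Selada,"), ("e", "Paprika,"), ("f", "Bawang,")]
def dagingA : PySem.Dict String String :=
  PySem.Dict.ofList [("g", "Daging Ayam."), ("h", "Daging Sapi."), ("i", "Daging Tuna.")]
def sausA : PySem.Dict String String :=
  PySem.Dict.ofList [("j", "Saus BBQ."), ("k", "Saus Mayonnaise."), ("l", "Saus Tomat."), ("m", "Saus Cabai.")]

-- one step of A's for-loop over the four accumulated output strings;
-- roti[i] etc. are ported as getD with default "" — exact, each access is guarded by 'i in dict'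
def convertStep (acc : String × String × String × String) (i : String) :
    String × String × String × String :=
  let (r, s, d, g) := acc
  if rotiA.contains i then (r ++ rotiA.getD i "", s, d, g)
  else if sayurA.contains i then (r, s ++ (sayurA.getD i "" ++ " "), d, g)
  else if dagingA.contains i then (r, s, d ++ dagingA.getD i "", g)
  else if sausA.contains i then (r, s, d, g ++ sausA.getD i "")
  else (r, s, d, g)

def convert (list : List String) : String :=
  let acc := list.foldl convertStep ("Roti : ", "Sayur : ", "Daging : ", "Saus : ")
  let sayur_output := PySem.Str.slice acc.2.1 none (some (-2)) ++ "."
  acc.1 ++ "\n" ++ sayur_output ++ "\n" ++ acc.2.2.1 ++ "\n" ++ acc.2.2.2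

-- ===== PORT B =====
def rotiB : PySem.Dict String String :=
  PySem.Dict.ofList [("a", "Roti Kecil."), ("b", "Roti Besar.")]
def sayurB : PySem.Dict String String :=
  PySem.Dict.ofList [("c", "Tomat,"), ("d", "Selada,"), ("e", "Paprika,"), ("f", "Bawang,")]
def dagingB : PySem.Dict String String :=
  PySem.Dict.ofList [("g", "Daging Ayam."), ("h", "Daging Sapi."), ("i", "Daging Tuna.")]
def sausB : PySem.Dict String String :=
  PySem.Dict.ofList [("j", "Saus BBQ."), ("k", "Saus Mayonnaise."), ("l", "Saus Tomat."), ("m", "Saus Cabai.")]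

def convert_alt (list : List String) : String :=
  let roti_output := "Roti : " ++
    PySem.Str.join "" ((list.filter (fun c => rotiB.contains c)).map (fun c => rotiB.getD c ""))
  let sayur_mid := "Sayur : " ++
    PySem.Str.join "" ((list.filter (fun c => sayurB.contains c)).map (fun c => sayurB.getD c "" ++ " "))
  let sayur_output := PySem.Str.slice sayur_mid none (some (-2)) ++ "."
  let daging_output := "Daging : " ++
    PySem.Str.join "" ((list.filter (fun c => dagingB.contains c)).map (fun c => dagingB.getD c ""))
  let saus_output := "Saus : " ++
    PySem.Str.join "" ((list.filter (fun c => sausB.contains c)).map (fun c => sausB.getD c ""))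
  roti_output ++ "\n" ++ sayur_output ++ "\n" ++ daging_output ++ "\n" ++ saus_output

-- ===== PRECONDITION & SPEC =====
def Spec_convert (list : List String) (out : String) : Prop := out = convert_alt list
instance (list : List String) (out : String) : Decidable (Spec_convert list out) := by unfold Spec_convert; infer_instance

-- ===== CLAIM (what is proved, stated in full; the proofs are below) =====
def Claim_equal_convert : Prop := ∀ (list : List String), Dom_convert list → Spec_convert list (convert list)

-- ===== LEMMAS AND PROOFS =====
theorem chars_join_empty_cons (x : List Char) (xs : List (List Char)) :
    PySem.Chars.join [] (x :: xs) = x ++ PySem.Chars.join [] xs := by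
  cases xs <;> simp [PySem.Chars.join, List.intercalate, List.intersperse]

theorem str_join_empty_cons (x : String) (xs : List String) :
    PySem.Str.join "" (x :: xs) = x ++ PySem.Str.join "" xs := by
  simp [PySem.Str.join, chars_join_empty_cons]


theorem rotiA_mk : rotiA = PySem.Dict.mk [("a", "Roti Kecil."), ("b", "Roti Besar.")] := by decide
theorem sayurA_mk : sayurA = PySem.Dict.mk [("c", "Tomat,"), ("d", "Selada,"), ("e", "Paprika,"), ("f", "Bawang,")] := by decide
theorem dagingA_mk : dagingA = PySem.Dict.mk [("g", "Daging Ayam."), ("h", "Daging Sapi."), ("i", "Daging Tuna.")] := by decide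
theorem sausA_mk : sausA = PySem.Dict.mk [("j", "Saus BBQ."), ("k", "Saus Mayonnaise."), ("l", "Saus Tomat."), ("m", "Saus Cabai.")] := by decide

theorem rotiB_eq : rotiB = rotiA := by decide
theorem sayurB_eq : sayurB = sayurA := by decide
theorem dagingB_eq : dagingB = dagingA := by decide
theorem sausB_eq : sausB = sausA := by decide

theorem rotiA_cases (i : String) (h : rotiA.contains i = true) : i = "a" ∨ i = "b" := by
  rw [rotiA_mk] at h
  simp [PySem.Dict.contains_mk] at h
  exact h.imp Eq.symm Eq.symm

theorem sayurA_cases (i : String) (h : sayurA.contains i = true) :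
    i = "c" ∨ i = "d" ∨ i = "e" ∨ i = "f" := by
  rw [sayurA_mk] at h
  simp [PySem.Dict.contains_mk] at h
  tauto

theorem dagingA_cases (i : String) (h : dagingA.contains i = true) :
    i = "g" ∨ i = "h" ∨ i = "i" := by
  rw [dagingA_mk] at h
  simp [PySem.Dict.contains_mk] at h
  tauto

theorem sausA_cases (i : String) (h : sausA.contains i = true) :
    i = "j" ∨ i = "k" ∨ i = "l" ∨ i = "m" := by
  rw [sausA_mk] at h
  simp [PySem.Dict.contains_mk] at h
  tauto

theorem loop_eq (l : List String) (r s d g : String) :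
    l.foldl convertStep (r, s, d, g) =
      (r ++ PySem.Str.join "" ((l.filter (fun c => rotiB.contains c)).map (fun c => rotiB.getD c "")),
       s ++ PySem.Str.join "" ((l.filter (fun c => sayurB.contains c)).map (fun c => sayurB.getD c "" ++ " ")),
       d ++ PySem.Str.join "" ((l.filter (fun c => dagingB.contains c)).map (fun c => dagingB.getD c "")),
       g ++ PySem.Str.join "" ((l.filter (fun c => sausB.contains c)).map (fun c => sausB.getD c ""))) := by
  induction l generalizing r s d g with
  | nil => simp [PySem.Str.join, PySem.Chars.join, List.intercalate]
  | cons i t ih =>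
    simp only [List.foldl_cons, List.filter_cons]
    by_cases h1 : rotiA.contains i = true
    · rcases rotiA_cases i h1 with rfl | rfl <;>
        simp [convertStep, rotiB_eq, sayurB_eq, dagingB_eq, sausB_eq, rotiA_mk, sayurA_mk, dagingA_mk, sausA_mk, PySem.Dict.contains_mk, PySem.Dict.getD, PySem.Dict.get?_mk_cons, str_join_empty_cons, String.append_assoc, ih]
    · by_cases h2 : sayurA.contains i = true
      · rcases sayurA_cases i h2 with rfl | rfl | rfl | rfl <;>
          simp [convertStep, rotiB_eq, sayurB_eq, dagingB_eq, sausB_eq, rotiA_mk, sayurA_mk, dagingA_mk, sausA_mk, PySem.Dict.contains_mk, PySem.Dict.getD, PySem.Dict.get?_mk_cons, str_join_empty_cons, String.append_assoc, ih]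
      · by_cases h3 : dagingA.contains i = true
        · rcases dagingA_cases i h3 with rfl | rfl | rfl <;>
            simp [convertStep, rotiB_eq, sayurB_eq, dagingB_eq, sausB_eq, rotiA_mk, sayurA_mk, dagingA_mk, sausA_mk, PySem.Dict.contains_mk, PySem.Dict.getD, PySem.Dict.get?_mk_cons, str_join_empty_cons, String.append_assoc, ih]
        · by_cases h4 : sausA.contains i = true
          · rcases sausA_cases i h4 with rfl | rfl | rfl | rfl <;>
              simp [convertStep, rotiB_eq, sayurB_eq, dagingB_eq, sausB_eq, rotiA_mk, sayurA_mk, dagingA_mk, sausA_mk, PySem.Dict.contains_mk, PySem.Dict.getD, PySem.Dict.get?_mk_cons, str_join_empty_cons, String.append_assoc, ih]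
          · simp [convertStep, rotiB_eq, sayurB_eq, dagingB_eq, sausB_eq, h1, h2, h3, h4, ih]

-- ===== VERDICT (by name: the statement is the Claim_ definition above) =====
theorem convert_spec : Claim_equal_convert := by
  intro list _
  unfold Spec_convert convert convert_alt
  rw [loop_eq]
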